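-- pv_equiv track=rewrite | github.com/dcdanko/minerva_barcode_deconvolution | minerva/kraken/enhance_kraken.py | promote_and_count2
-- ===== SOURCE A (Python) =====
-- def promote(taxas, taxa_tree=None):
--     if taxa_tree is None:
--         taxa_tree = build_taxa_tree(taxas)
--     promoted_taxas = []
--     for taxa in taxas:
--         root = taxa_tree
--         promoted = []
--         for rank in taxa:
--             root = root[rank]
--             promoted.append(rank)
--         while len(root) == 1:
--             rank = list(root.keys())[0]
--             root = root[rank]
--             promoted.append(rank)
--         promoted_taxas.append(promoted)
--     return promoted_taxas
--
-- def build_taxa_tree(taxas):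
--     taxa_tree = {}
--     for taxa in taxas:
--         root = taxa_tree
--         for rank in taxa:
--             try:
--                 root = root[rank]
--             except KeyError:
--                 root[rank] = {}
--                 root = root[rank]
--     return taxa_tree
--
-- def promote_and_count2(bx_tbl):
--     tbl = {}
--     for taxas in bx_tbl.values():
--         promoted = promote(taxas)
--         for original_taxa, promoted_taxa in zip(taxas, promoted):
--             otaxa, ptaxa = ';'.join(original_taxa), ';'.join(promoted_taxa)
--             key = otaxa + ' -> ' + ptaxa
--             try:
--                 tbl[key] += 1
--             except KeyError:
--                 tbl[key] = 1
--     return tbl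
-- ===== SOURCE B (Python) =====
-- def promote_and_count2(bx_tbl):
--     # Trie-free: promote each taxon by re-scanning the group's taxa list for
--     # the unique continuation of the current prefix (scanning vs nested-dict tree).
--     tbl = {}
--     for taxas in bx_tbl.values():
--         limit = max((len(t) for t in taxas), default=0)
--         for taxa in taxas:
--             prefix = list(taxa)
--             for _ in range(limit - len(prefix)):
--                 n = len(prefix)
--                 nexts = {t[n] for t in taxas if t[:n] == prefix and len(t) > n}
--                 if len(nexts) != 1:
--                     break
--                 prefix.append(nexts.pop())
--             key = ';'.join(taxa) + ' -> ' + ';'.join(prefix)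
--             tbl[key] = tbl.get(key, 0) + 1
--     return tbl
-- ===== Notes on version B (the rewrite author's own statement) =====
-- stated objective: alternative
-- what changed: B removes the nested-dict trie entirely: each taxon is promoted by re-scanning the group's taxa list for the set of distinct continuations of the current prefix and extending while that set is a singleton, instead of building and walking a dict-of-dicts tree.
import Mathlib
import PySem

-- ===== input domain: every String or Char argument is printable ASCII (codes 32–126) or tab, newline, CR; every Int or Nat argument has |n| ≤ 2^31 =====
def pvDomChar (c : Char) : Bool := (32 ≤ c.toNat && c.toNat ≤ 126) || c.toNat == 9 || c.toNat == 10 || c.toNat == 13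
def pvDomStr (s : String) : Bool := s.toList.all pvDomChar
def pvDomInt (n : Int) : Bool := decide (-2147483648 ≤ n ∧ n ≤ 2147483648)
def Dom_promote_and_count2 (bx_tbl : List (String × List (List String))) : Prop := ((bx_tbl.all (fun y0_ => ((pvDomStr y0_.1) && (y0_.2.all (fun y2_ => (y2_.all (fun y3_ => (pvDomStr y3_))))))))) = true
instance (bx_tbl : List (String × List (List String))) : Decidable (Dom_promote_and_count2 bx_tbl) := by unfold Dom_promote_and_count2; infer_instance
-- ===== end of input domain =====

-- B drops A's nested-dict trie and instead promotes each taxon by re-scanning the group's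
-- taxa list for the unique continuation of the current prefix (alternative decomposition,
-- not claimed faster). No observable argument mutation; equivalence is about the return dict.

-- ===== PORT A =====
-- Python's nested dict-of-dicts trie, encoded as a mutual pair (children in insertion order).
mutual
inductive PTrie : Type where
  | node : PEntries → PTrie
inductive PEntries : Type where
  | nil : PEntries
  | cons : String → PTrie → PEntries → PEntries
end

def PTrie.ent : PTrie → PEntries
  | .node es => es

-- root[rank] lookup (first match; keys in a dict are unique anyway)
def findE : PEntries → String → Option PTrie
  | .nil, _ => none
  | .cons k c es, r => if k == r then some c else findE es r

-- root = root[rank] in promote: KeyError is impossible there (every taxa was inserted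
-- into the tree first), so the default empty node is never reached on A's actual calls.
def childD (t : PTrie) (r : String) : PTrie := (findE t.ent r).getD (.node .nil)

-- build_taxa_tree's inner loop: descend, creating missing children ({} appended at the end)
mutual
def insPath : PTrie → List String → PTrie
  | t, [] => t
  | .node es, r :: rs => .node (insEntries es r rs)
termination_by t path => (path.length, sizeOf t)
decreasing_by all_goals simp_wf; omega
def insEntries : PEntries → String → List String → PEntries
  | .nil, r, rs => .cons r (insPath (.node .nil) rs) .nil
  | .cons k c es, r, rs =>
      if k == r then .cons k (insPath c rs) es else .cons k c (insEntries es r rs)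
termination_by es _ rs => (rs.length + 1, sizeOf es)
decreasing_by all_goals simp_wf; omega
end

def build_taxa_tree (taxas : List (List String)) : PTrie :=
  taxas.foldl insPath (.node .nil)

-- 'for rank in taxa: root = root[rank]; promoted.append(rank)'
def walkA : PTrie → List String → List String → PTrie × List String
  | t, [], promoted => (t, promoted)
  | t, r :: rs, promoted => walkA (childD t r) rs (promoted ++ [r])

-- 'while len(root) == 1: rank = list(root.keys())[0]; root = root[rank]; promoted.append(rank)'
-- (len(root) == 1 is exactly the child-list shape cons k c nil; keys()[0] = k; root[k] = c)
def descendA : PTrie → List String → List String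
  | .node (.cons k c .nil), promoted => descendA c (promoted ++ [k])
  | _, promoted => promoted
termination_by t _ => sizeOf t
decreasing_by simp_wf; omega

def promoteA (taxas : List (List String)) : List (List String) :=
  let taxa_tree := build_taxa_tree taxas
  taxas.foldl (fun promoted_taxas taxa =>
    let wp := walkA taxa_tree taxa []
    promoted_taxas ++ [descendA wp.1 wp.2]) []

def promote_and_count2 (bx_tbl : List (String × List (List String))) : List (String × Int) :=
  (bx_tbl.foldl (fun (tbl : PySem.Dict String Int) grp =>
    let taxas := grp.2
    let promoted := promoteA taxas
    (taxas.zip promoted).foldl (fun tbl op =>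
      let key := PySem.Str.join ";" op.1 ++ " -> " ++ PySem.Str.join ";" op.2
      -- try tbl[key] += 1 / except KeyError: tbl[key] = 1
      tbl.insert key (tbl.getD key 0 + 1)) tbl) PySem.Dict.empty).items

-- ===== PORT B =====
-- one comprehension element: 't[n] if t[:n] == prefix and len(t) > n'
-- (t[n]? is some exactly when n < len t, which is the 'len(t) > n' guard; n = len(prefix) ≥ 0)
def pvNext (p : List String) (t : List String) : Option String :=
  if t.take p.length = p then t[p.length]? else none

-- nexts = {t[n] for t in taxas if t[:n] == prefix and len(t) > n}
def nextsB (taxas : List (List String)) (p : List String) : PySem.Set String :=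
  PySem.Set.ofList (taxas.filterMap (pvNext p))

-- 'for _ in range(limit - len(prefix)): … if len(nexts) != 1: break; prefix.append(nexts.pop())'
def extendB (taxas : List (List String)) (p : List String) : Nat → List String
  | 0 => p
  | fuel + 1 =>
    match nextsB taxas p with
    | [k] => extendB taxas (p ++ [k]) fuel
    | _ => p

def promote_and_count2_alt (bx_tbl : List (String × List (List String))) : List (String × Int) :=
  (bx_tbl.foldl (fun (tbl : PySem.Dict String Int) grp =>
    let taxas := grp.2
    -- limit = max((len(t) for t in taxas), default=0)
    let limit := PySem.List.maxD (taxas.map List.length) (fun x => x) 0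
    taxas.foldl (fun tbl taxa =>
      let pfx := extendB taxas taxa (limit - taxa.length)
      let key := PySem.Str.join ";" taxa ++ " -> " ++ PySem.Str.join ";" pfx
      -- tbl[key] = tbl.get(key, 0) + 1
      tbl.insert key (tbl.getD key 0 + 1)) tbl) PySem.Dict.empty).items

-- ===== PRECONDITION & SPEC =====
def Spec_promote_and_count2 (bx_tbl : List (String × List (List String))) (out : List (String × Int)) : Prop := out = promote_and_count2_alt bx_tbl
instance (bx_tbl : List (String × List (List String))) (out : List (String × Int)) : Decidable (Spec_promote_and_count2 bx_tbl out) := by unfold Spec_promote_and_count2; infer_instance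

-- ===== CLAIM (what is proved, stated in full; the proofs are below) =====
def Claim_equal_promote_and_count2 : Prop := ∀ (bx_tbl : List (String × List (List String))), Dom_promote_and_count2 bx_tbl → Spec_promote_and_count2 bx_tbl (promote_and_count2 bx_tbl)

-- ===== LEMMAS AND PROOFS =====

-- the child-key list of a node (list(root.keys()))
def keysE : PEntries → List String
  | .nil => []
  | .cons k _ es => k :: keysE es

-- the trie walk without the promoted-list accumulator
def wk : PTrie → List String → PTrie
  | t, [] => t
  | t, r :: rs => wk (childD t r) rs

-- one step of B's set comprehension, as a fold step
def stepK (p : List String) (s : PySem.Set String) (x : List String) : PySem.Set String :=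
  match pvNext p x with
  | some k => PySem.Set.add s k
  | none => s

-- clean equations for descendA's three shapes
theorem descendA_one (k : String) (c : PTrie) (p : List String) :
    descendA (.node (.cons k c .nil)) p = descendA c (p ++ [k]) := by
  rw [descendA]

theorem descendA_nil (p : List String) : descendA (.node .nil) p = p := by
  simp [descendA]

theorem descendA_two (a : String) (b : PTrie) (x : String) (y : PTrie) (z : PEntries)
    (p : List String) : descendA (.node (.cons a b (.cons x y z))) p = p := by
  simp [descendA]

theorem walkA_eq (p : List String) : ∀ (t : PTrie) (acc : List String),
    walkA t p acc = (wk t p, acc ++ p) := by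
  induction p with
  | nil => intro t acc; simp [walkA, wk]
  | cons r rs ih => intro t acc; simp [walkA, wk, ih]

theorem wk_empty (p : List String) : wk (.node .nil) p = .node .nil := by
  induction p with
  | nil => rfl
  | cons r rs ih => simpa [wk, childD, PTrie.ent, findE] using ih

theorem keysE_insEntries (es : PEntries) (r : String) (rs : List String) :
    keysE (insEntries es r rs) = PySem.Set.add (keysE es) r := by
  cases es with
  | nil => simp [insEntries, keysE, PySem.Set.add]
  | cons k c es' =>
    by_cases h : k = r
    · subst h; simp [insEntries, keysE, PySem.Set.add]
    · have hb : (k == r) = false := by simpa using h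
      have hrb : (r == k) = false := by simpa using fun hh : r = k => h hh.symm
      simp only [insEntries, hb, Bool.false_eq_true, if_false, keysE,
        keysE_insEntries es' r rs, PySem.Set.add, PySem.Set.contains, List.contains_cons,
        hrb, Bool.false_or]
      split <;> rfl

theorem findE_insEntries_ne (es : PEntries) (q r : String) (rs : List String) (h : ¬ q = r) :
    findE (insEntries es r rs) q = findE es q := by
  have hrq : (r == q) = false := by simpa using fun hh : r = q => h hh.symm
  cases es with
  | nil => simp [insEntries, findE, hrq]
  | cons k c es' =>
    by_cases hk : k = r
    · subst hk; simp [insEntries, findE, hrq]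
    · have hb : (k == r) = false := by simpa using hk
      simp [insEntries, hb, findE, findE_insEntries_ne es' q r rs h]

theorem findE_insEntries_self (es : PEntries) (r : String) (rs : List String) :
    findE (insEntries es r rs) r = some (insPath ((findE es r).getD (.node .nil)) rs) := by
  cases es with
  | nil => simp [insEntries, findE]
  | cons k c es' =>
    by_cases hk : k = r
    · subst hk; simp [insEntries, findE]
    · have hb : (k == r) = false := by simpa using hk
      simp [insEntries, hb, findE, findE_insEntries_self es' r rs]

theorem keysE_wk_insPath (p : List String) : ∀ (taxa : List String) (t : PTrie),
    keysE ((wk (insPath t taxa) p).ent) = stepK p (keysE ((wk t p).ent)) taxa := by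
  induction p with
  | nil =>
    intro taxa t
    cases taxa with
    | nil => simp [insPath, wk, stepK, pvNext]
    | cons r rs =>
      cases t with
      | node es => simp [insPath, wk, stepK, pvNext, PTrie.ent, keysE_insEntries]
  | cons q p' ih =>
    intro taxa t
    cases taxa with
    | nil => simp [insPath, wk, stepK, pvNext]
    | cons r rs =>
      cases t with
      | node es =>
        by_cases hq : q = r
        · subst hq
          have hnext : pvNext (q :: p') (q :: rs) = pvNext p' rs := by
            simp [pvNext, List.take_succ_cons]
          simp only [insPath, wk, childD, PTrie.ent, findE_insEntries_self, Option.getD_some,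
            stepK, hnext]
          exact ih rs ((findE es q).getD (.node .nil))
        · have hnext : pvNext (q :: p') (r :: rs) = none := by
            simp [pvNext, List.take_succ_cons]
            intro h1; exact absurd h1.symm hq
          simp only [insPath, wk, childD, PTrie.ent, findE_insEntries_ne es q r rs hq,
            stepK, hnext]

theorem foldl_stepK (p : List String) : ∀ (xs : List (List String)) (s : PySem.Set String),
    xs.foldl (stepK p) s = (xs.filterMap (pvNext p)).foldl PySem.Set.add s := by
  intro xs
  induction xs with
  | nil => intro s; rfl
  | cons x xs ih =>
    intro s
    cases hx : pvNext p x <;> simp [stepK, hx, ih]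

theorem keysE_wk_foldl (p : List String) : ∀ (txs : List (List String)) (t : PTrie),
    keysE ((wk (txs.foldl insPath t) p).ent) = txs.foldl (stepK p) (keysE ((wk t p).ent)) := by
  intro txs
  induction txs with
  | nil => intro t; rfl
  | cons x txs ih =>
    intro t
    simp only [List.foldl_cons]
    rw [ih, keysE_wk_insPath]

theorem keysE_wk_build (taxas : List (List String)) (p : List String) :
    keysE ((wk (build_taxa_tree taxas) p).ent) = nextsB taxas p := by
  rw [build_taxa_tree, keysE_wk_foldl, wk_empty]
  simp only [PTrie.ent, keysE, foldl_stepK]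
  rw [nextsB, PySem.Set.ofList_eq_foldl]

theorem wk_snoc (p : List String) : ∀ (t : PTrie) (k : String),
    wk t (p ++ [k]) = childD (wk t p) k := by
  induction p with
  | nil => intro t k; rfl
  | cons r rs ih => intro t k; simp [wk, ih]

theorem nextsB_singleton_lt (taxas : List (List String)) (p : List String) (k : String)
    (h : nextsB taxas p = [k]) :
    p.length < PySem.List.maxD (taxas.map List.length) (fun x => x) 0 := by
  have hk : k ∈ nextsB taxas p := by rw [h]; simp
  rw [nextsB, PySem.Set.mem_ofList] at hk
  rcases List.mem_filterMap.mp hk with ⟨t, ht, hpv⟩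
  rw [pvNext] at hpv
  by_cases hp : t.take p.length = p
  · simp only [hp, if_pos] at hpv
    have hlt : p.length < t.length := (List.getElem?_eq_some_iff.mp hpv).1
    have hmem : t.length ∈ taxas.map List.length := List.mem_map_of_mem ht
    have hle : t.length ≤ PySem.List.maxD (taxas.map List.length) (fun x => x) 0 := by
      unfold PySem.List.maxD
      cases hm : PySem.List.max? (taxas.map List.length) (fun y => y) with
      | none => rw [PySem.List.max?_eq_none_iff] at hm; simp [hm] at hmem
      | some m => simpa using PySem.List.max?_isMax hm t.length hmem
    omega
  · simp [hp] at hpv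

theorem keysE_eq_singleton (es : PEntries) (k : String) (h : keysE es = [k]) :
    ∃ c, es = .cons k c .nil := by
  cases es with
  | nil => simp [keysE] at h
  | cons k' c es' =>
    simp only [keysE, List.cons.injEq] at h
    cases es' with
    | nil => exact ⟨c, by rw [h.1]⟩
    | cons a b e => simp [keysE] at h

theorem descendA_eq_extendB (taxas : List (List String)) (f : Nat) : ∀ (p : List String),
    f = PySem.List.maxD (taxas.map List.length) (fun x => x) 0 - p.length →
    descendA (wk (build_taxa_tree taxas) p) p = extendB taxas p f := by
  induction f with
  | zero =>
    intro p hf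
    rw [extendB]
    cases hE : wk (build_taxa_tree taxas) p with
    | node es =>
      cases es with
      | nil => exact descendA_nil p
      | cons k c es' =>
        cases es' with
        | cons a b e => exact descendA_two k c a b e p
        | nil =>
          exfalso
          have hk := keysE_wk_build taxas p
          rw [hE] at hk
          simp only [PTrie.ent, keysE] at hk
          have := nextsB_singleton_lt taxas p k hk.symm
          omega
  | succ f ih =>
    intro p hf
    cases hN : nextsB taxas p with
    | nil =>
      have hk := keysE_wk_build taxas p
      rw [hN] at hk
      have hR : extendB taxas p (f + 1) = p := by rw [extendB, hN]
      rw [hR]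
      cases hE : wk (build_taxa_tree taxas) p with
      | node es =>
        rw [hE] at hk
        cases es with
        | nil => exact descendA_nil p
        | cons k c es' => simp [PTrie.ent, keysE] at hk
    | cons k ks =>
      cases ks with
      | cons k2 ks2 =>
        have hk := keysE_wk_build taxas p
        rw [hN] at hk
        have hR : extendB taxas p (f + 1) = p := by rw [extendB, hN]
        rw [hR]
        cases hE : wk (build_taxa_tree taxas) p with
        | node es =>
          rw [hE] at hk
          cases es with
          | nil => simp [PTrie.ent, keysE] at hk
          | cons k' c es' =>
            cases es' with
            | nil => simp [PTrie.ent, keysE] at hk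
            | cons a b e => exact descendA_two k' c a b e p
      | nil =>
        have hk := keysE_wk_build taxas p
        rw [hN] at hk
        have hlt := nextsB_singleton_lt taxas p k hN
        have hR : extendB taxas p (f + 1) = extendB taxas (p ++ [k]) f := by
          rw [extendB, hN]
        rw [hR]
        cases hE : wk (build_taxa_tree taxas) p with
        | node es =>
          rw [hE] at hk
          simp only [PTrie.ent] at hk
          rcases keysE_eq_singleton es k hk with ⟨c, rfl⟩
          have hchild : wk (build_taxa_tree taxas) (p ++ [k]) = c := by
            rw [wk_snoc, hE, childD]
            simp [PTrie.ent, findE]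
          rw [descendA_one, ← hchild]
          have hlen : f = PySem.List.maxD (taxas.map List.length) (fun x => x) 0 -
              (p ++ [k]).length := by
            simp only [List.length_append, List.length_cons, List.length_nil]
            omega
          exact ih (p ++ [k]) hlen

theorem promoteA_inner_eq (bx_tbl : List (String × List (List String))) :
    promote_and_count2 bx_tbl = promote_and_count2_alt bx_tbl := by
  rw [promote_and_count2, promote_and_count2_alt]
  congr 1
  apply PySem.List.foldl_congr_mem
  intro tbl grp _
  have hpromote : promoteA grp.2 =
      grp.2.map (fun taxa =>
        extendB grp.2 taxa
          (PySem.List.maxD (grp.2.map List.length) (fun x => x) 0 - taxa.length)) := by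
    rw [promoteA]
    simp only [walkA_eq, List.nil_append]
    rw [PySem.List.foldl_append_singleton_eq_map]
    simp only [List.nil_append]
    apply List.map_congr_left
    intro taxa _
    exact descendA_eq_extendB grp.2 _ taxa rfl
  simp only [hpromote]
  have hzip : grp.2.zip (grp.2.map (fun taxa =>
      extendB grp.2 taxa
        (PySem.List.maxD (grp.2.map List.length) (fun x => x) 0 - taxa.length))) =
      grp.2.map (fun taxa => (taxa,
        extendB grp.2 taxa
          (PySem.List.maxD (grp.2.map List.length) (fun x => x) 0 - taxa.length))) := by
    have := List.zip_map' (f := fun (x : List String) => x)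
      (g := fun taxa => extendB grp.2 taxa
        (PySem.List.maxD (grp.2.map List.length) (fun x => x) 0 - taxa.length)) (l := grp.2)
    simpa using this
  rw [hzip, List.foldl_map]

-- ===== VERDICT (by name: the statement is the Claim_ definition above) =====
theorem promote_and_count2_spec : Claim_equal_promote_and_count2 := by
  intro bx_tbl _
  unfold Spec_promote_and_count2
  exact promoteA_inner_eq bx_tbl
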